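-- pv_equiv track=rewrite | github.com/mastergap/hackerrank | Implementation.py | find_decent_number
-- ===== SOURCE A (Python) =====
-- def find_decent_number(n):
--         digits_5 = 0
--         digits_3 = 0
--         if n % 3 == 0:
--             digits_5 = n
--         elif n % 3 == 1 and n > 9:
--             digits_3 = 10
--             digits_5 = int(n / 3) * 3 - 9
--         elif n % 3 == 2 and n > 4:
--             digits_3 = 5
--             digits_5 = int(n / 3) * 3 - 3
--         elif n % 5 == 0:
--             digits_3 = n
--         else:
--             return -1
--
--         return int("".join("5" for _ in range(digits_5)) + "".join("3" for _ in range(digits_3)))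
-- ===== SOURCE B (Python) =====
-- def find_decent_number(n):
--     # search the (multiple-of-5) count of threes upward; first hit maximises fives
--     for threes in range(0, n + 1, 5):
--         fives = n - threes
--         if fives % 3 == 0:
--             return int("".join("5" for _ in range(fives)) + "".join("3" for _ in range(threes)))
--     return -1
-- ===== Notes on version B (the rewrite author's own statement) =====
-- stated objective: simpler
-- what changed: A's closed-form case split on n%3 (with float int(n/3) arithmetic) is replaced by a short search loop over the candidate number of trailing threes (0,5,10,...), returning at the first count that leaves a multiple of 3 fives; the loop decides within at most three iterations.
import Mathlib
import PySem

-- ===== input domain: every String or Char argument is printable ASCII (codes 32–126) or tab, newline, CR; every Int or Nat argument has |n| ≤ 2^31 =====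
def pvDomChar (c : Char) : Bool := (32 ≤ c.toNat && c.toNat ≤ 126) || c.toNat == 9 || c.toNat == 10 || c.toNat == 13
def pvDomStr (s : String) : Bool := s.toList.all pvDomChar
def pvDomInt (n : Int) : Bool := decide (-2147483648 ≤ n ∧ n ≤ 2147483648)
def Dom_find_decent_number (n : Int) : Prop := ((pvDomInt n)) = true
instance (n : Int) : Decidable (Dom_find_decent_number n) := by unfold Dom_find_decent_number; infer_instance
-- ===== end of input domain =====

-- B replaces A's closed-form case split on n % 3 by a short upward search over the
-- number of trailing threes (objective: simpler); return values only are compared.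

-- ===== PORT A =====
-- Python's shared 'return int("".join("5" for _ in range(d5)) + "".join("3" for _ in range(d3)))'.
-- .getD 0: int("") raises ValueError in Python; those inputs are excluded by Pre_ below.
def fdnDigits (d5 d3 : Int) : Int :=
  (PySem.Int.ofChars?
    (((PySem.List.pyRange 0 d5 1).map (fun _ => '5')) ++
     ((PySem.List.pyRange 0 d3 1).map (fun _ => '3')))).getD 0

-- int(n / 3) is ported as Int.tdiv n 3 (truncation toward zero): exact on the domain
-- |n| ≤ 2^31 because the float n/3 has error < 1/3, so truncation never crosses an integer.
def find_decent_number (n : Int) : Int :=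
  if PySem.Int.mod n 3 = 0 then
    fdnDigits n 0
  else if PySem.Int.mod n 3 = 1 ∧ 9 < n then
    fdnDigits (Int.tdiv n 3 * 3 - 9) 10
  else if PySem.Int.mod n 3 = 2 ∧ 4 < n then
    fdnDigits (Int.tdiv n 3 * 3 - 3) 5
  else if PySem.Int.mod n 5 = 0 then
    fdnDigits 0 n
  else -1

-- ===== PORT B =====
-- the body of Source B's for-loop: the first threes in the range with fives % 3 == 0 wins
def fdnGo (n : Int) : List Int → Int
  | [] => -1
  | t :: rest =>
    if PySem.Int.mod (n - t) 3 = 0 then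
      (PySem.Int.ofChars?
        (((PySem.List.pyRange 0 (n - t) 1).map (fun _ => '5')) ++
         ((PySem.List.pyRange 0 t 1).map (fun _ => '3')))).getD 0
    else fdnGo n rest

def find_decent_number_alt (n : Int) : Int :=
  fdnGo n (PySem.List.pyRange 0 (n + 1) 5)

-- ===== PRECONDITION & SPEC =====
-- Pre_ excludes exactly the inputs on which Python A raises ValueError (int("")):
-- n = 0 and the negative n divisible by 3 or by 5 (B's empty search range returns -1
-- on the negative ones; at n = 0 B raises the same ValueError).
def Pre_find_decent_number (n : Int) : Prop :=
  0 < n ∨ (PySem.Int.mod n 3 ≠ 0 ∧ PySem.Int.mod n 5 ≠ 0)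
instance (n : Int) : Decidable (Pre_find_decent_number n) := by
  unfold Pre_find_decent_number; infer_instance
def pvWitness_find_decent_number : Int := 11

def Spec_find_decent_number (n : Int) (out : Int) : Prop := out = find_decent_number_alt n
instance (n : Int) (out : Int) : Decidable (Spec_find_decent_number n out) := by
  unfold Spec_find_decent_number; infer_instance

-- ===== CLAIM (what is proved, stated in full; the proofs are below) =====
def Claim_equal_find_decent_number : Prop := ∀ (n : Int), Dom_find_decent_number n → Pre_find_decent_number n → Spec_find_decent_number n (find_decent_number n)

-- ===== LEMMAS AND PROOFS =====

theorem fdn_mod3 (n : Int) : PySem.Int.mod n 3 = n % 3 :=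
  PySem.Int.mod_eq_emod_of_pos (by norm_num)

theorem fdn_mod5 (n : Int) : PySem.Int.mod n 5 = n % 5 :=
  PySem.Int.mod_eq_emod_of_pos (by norm_num)

theorem fdn_range_const (d : Int) (c : Char) :
    (PySem.List.pyRange 0 d 1).map (fun _ => c) = List.replicate d.toNat c := by
  rw [List.map_const', PySem.List.length_pyRange_one]
  norm_num

theorem fdnDigits_eq (d5 d3 : Int) :
    fdnDigits d5 d3 =
      (PySem.Int.ofChars? (List.replicate d5.toNat '5' ++ List.replicate d3.toNat '3')).getD 0 := by
  unfold fdnDigits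
  rw [fdn_range_const, fdn_range_const]

theorem fdnGo_hit (n t : Int) (rest : List Int) (h : (n - t) % 3 = 0) :
    fdnGo n (t :: rest) =
      (PySem.Int.ofChars? (List.replicate (n - t).toNat '5' ++ List.replicate t.toNat '3')).getD 0 := by
  simp only [fdnGo, fdn_mod3, h, if_pos, fdn_range_const]

theorem fdnGo_miss (n t : Int) (rest : List Int) (h : (n - t) % 3 ≠ 0) :
    fdnGo n (t :: rest) = fdnGo n rest := by
  simp only [fdnGo, fdn_mod3]
  exact if_neg h

theorem fdn_pyRange5_nil (a b : Int) (h : b ≤ a) : PySem.List.pyRange a b 5 = [] := by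
  rw [PySem.List.pyRange_of_pos a b (by norm_num)]
  rw [if_neg (by omega)]
  simp

theorem fdn_pyRange5_cons (a b : Int) (h : a < b) :
    PySem.List.pyRange a b 5 = a :: PySem.List.pyRange (a + 5) b 5 := by
  rw [PySem.List.pyRange_of_pos a b (by norm_num),
      PySem.List.pyRange_of_pos (a + 5) b (by norm_num)]
  rw [if_pos h]
  by_cases h5 : a + 5 < b
  · rw [if_pos h5]
    have hc : ((b - a + 5 - 1) / 5).toNat = ((b - (a + 5) + 5 - 1) / 5).toNat + 1 := by omega
    rw [hc, List.range_succ_eq_map]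
    simp only [List.map_cons, List.map_map, Nat.cast_zero, mul_zero, add_zero]
    congr 1
    apply List.map_congr_left
    intro k _
    simp only [Function.comp_apply]
    push_cast
    ring
  · rw [if_neg h5]
    have hc : ((b - a + 5 - 1) / 5).toNat = 1 := by omega
    rw [hc]
    simp

-- ===== VERDICT (by name: the statements are the Claim_ definitions above) =====
theorem find_decent_number_spec : Claim_equal_find_decent_number := by
  intro n _ hpre
  unfold Spec_find_decent_number
  have m3 := fdn_mod3
  have m5 := fdn_mod5
  unfold Pre_find_decent_number at hpre
  rw [m3 n, m5 n] at hpre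
  unfold find_decent_number find_decent_number_alt
  rw [m3 n, m5 n]
  by_cases h0 : n % 3 = 0
  · -- A takes the first branch; B succeeds at threes = 0
    have hn : 0 < n := by
      rcases hpre with h | ⟨h1, _⟩
      · exact h
      · exact absurd h0 h1
    rw [if_pos h0, fdn_pyRange5_cons 0 (n + 1) (by omega),
        fdnGo_hit n 0 _ (by omega), fdnDigits_eq]
    norm_num
  · rw [if_neg h0]
    by_cases h1 : n % 3 = 1
    · by_cases h9 : 9 < n
      · -- A: second branch; B fails at 0 and 5, succeeds at threes = 10
        rw [if_pos ⟨h1, h9⟩,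
            fdn_pyRange5_cons 0 (n + 1) (by omega), fdnGo_miss n 0 _ (by omega)]
        simp only [show (0:Int) + 5 = 5 from by norm_num]
        rw [fdn_pyRange5_cons 5 (n + 1) (by omega), fdnGo_miss n 5 _ (by omega)]
        simp only [show (5:Int) + 5 = 10 from by norm_num]
        rw [fdn_pyRange5_cons 10 (n + 1) (by omega), fdnGo_hit n 10 _ (by omega),
            fdnDigits_eq]
        have ht : Int.tdiv n 3 * 3 - 9 = n - 10 := by
          rw [Int.tdiv_eq_ediv, if_pos (Or.inl (by omega : (0:Int) ≤ n))]
          omega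
        rw [ht]
      · -- A: falls through to the n % 5 test; inside Pre_ this is n ∈ {1, 4, 7}
        -- (both sides -1 by computation) or a negative n with n % 5 ≠ 0 (both -1)
        rw [if_neg (by tauto), if_neg (by omega : ¬(n % 3 = 2 ∧ 4 < n))]
        have hn : n = 1 ∨ n = 4 ∨ n = 7 ∨ n < 0 := by omega
        rcases hn with h | h | h | h
        · subst h; decide
        · subst h; decide
        · subst h; decide
        · rcases hpre with hp | ⟨_, hp5⟩
          · omega
          · rw [if_neg hp5, fdn_pyRange5_nil 0 (n + 1) (by omega)]
            rfl
    · have h2 : n % 3 = 2 := by omega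
      by_cases h4 : 4 < n
      · -- A: third branch; B fails at 0, succeeds at threes = 5
        rw [if_neg (by tauto), if_pos ⟨h2, h4⟩,
            fdn_pyRange5_cons 0 (n + 1) (by omega), fdnGo_miss n 0 _ (by omega)]
        simp only [show (0:Int) + 5 = 5 from by norm_num]
        rw [fdn_pyRange5_cons 5 (n + 1) (by omega), fdnGo_hit n 5 _ (by omega),
            fdnDigits_eq]
        have ht : Int.tdiv n 3 * 3 - 3 = n - 5 := by
          rw [Int.tdiv_eq_ediv, if_pos (Or.inl (by omega : (0:Int) ≤ n))]
          omega
        rw [ht]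
      · -- inside Pre_ this is n = 2 (both -1 by computation) or a negative n with n % 5 ≠ 0 (both -1)
        rw [if_neg (by tauto), if_neg (by tauto)]
        have hn : n = 2 ∨ n < 0 := by omega
        rcases hn with h | h
        · subst h; decide
        · rcases hpre with hp | ⟨_, hp5⟩
          · omega
          · rw [if_neg hp5, fdn_pyRange5_nil 0 (n + 1) (by omega)]
            rfl
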